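-- pv_equiv track=rewrite | github.com/YastrebCode/Urban | cipher.py | request
-- ===== SOURCE A (Python) =====
-- def request(number):
--     dividers=[]
--     for i in range(3, number+1):
--         if number % i == 0:
--             dividers.append(i)
--     count=1
--     tmp=""
--     for i in range(1, number + 1):
--         tmp = str(tmp) + brute_forcer(number, dividers, count)
--         count +=1
--     return tmp
--
-- def brute_forcer(number, dividers, count):
--     tmp = ""
--     for i in dividers:
--         if i - count > 0 and i - count > count:
--             tmp=str(tmp) + " " + str(count) + " " + str((i - count)) + " | "
--     return str(tmp)
-- ===== SOURCE B (Python) =====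
-- def request(number):
--     divs = set()
--     j = 1
--     while j * j <= number:
--         if number % j == 0:
--             divs.add(j)
--             divs.add(number // j)
--         j += 1
--     dividers = sorted(d for d in divs if d >= 3)
--     parts = []
--     for count in range(1, number + 1):
--         for d in dividers:
--             if d - count > count:
--                 parts.append(" " + str(count) + " " + str(d - count) + " | ")
--     return "".join(parts)
-- ===== Notes on version B (the rewrite author's own statement) =====
-- stated objective: alternative
-- what changed: B finds the divisors with an O(sqrt(n)) divisor/cofactor sweep collected into a set and sorted once, instead of A's O(n) trial scan over 3..n, and builds the output as a list of fragments joined once instead of A's repeated string concatenation with a separate counter.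
import Mathlib
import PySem

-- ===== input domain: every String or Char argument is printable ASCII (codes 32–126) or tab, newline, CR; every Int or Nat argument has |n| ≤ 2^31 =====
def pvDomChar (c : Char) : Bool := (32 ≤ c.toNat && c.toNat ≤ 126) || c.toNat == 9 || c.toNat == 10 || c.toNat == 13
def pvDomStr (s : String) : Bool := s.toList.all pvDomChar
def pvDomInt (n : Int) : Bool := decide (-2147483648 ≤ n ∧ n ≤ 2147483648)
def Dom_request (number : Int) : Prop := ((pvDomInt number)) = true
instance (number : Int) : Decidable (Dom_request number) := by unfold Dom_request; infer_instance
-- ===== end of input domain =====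

-- B: the divisors are found by a sqrt-bounded divisor/cofactor sweep into a set, sorted once,
-- instead of A's trial scan over 3..n; the emission builds a fragments list joined once
-- (an alternative algorithm; the overall cost stays dominated by the emission loop).

-- ===== PORT A =====
def brute_forcer (number : Int) (dividers : List Int) (count : Int) : String :=
  dividers.foldl (fun tmp i =>
    if i - count > 0 ∧ i - count > count then
      tmp ++ " " ++ PySem.Int.toStr count ++ " " ++ PySem.Int.toStr (i - count) ++ " | "
    else tmp) ""

def request (number : Int) : String :=
  let dividers := (PySem.List.pyRange 3 (number+1) 1).foldl
    (fun acc i => if PySem.Int.mod number i = 0 then acc ++ [i] else acc) ([] : List Int)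
  let st := (PySem.List.pyRange 1 (number+1) 1).foldl
    (fun (p : String × Int) _i => (p.1 ++ brute_forcer number dividers p.2, p.2 + 1)) ("", 1)
  st.1

-- ===== PORT B =====
-- the `while j*j <= number: … j += 1` loop of Source B; fuel `number.toNat + 1` is enough since
-- the loop runs at most √number times
def collectDivs (number : Int) : Nat → Int → PySem.Set Int → PySem.Set Int
  | 0, _, s => s
  | fuel+1, j, s =>
    if j * j ≤ number then
      collectDivs number fuel (j+1)
        (if PySem.Int.mod number j = 0 then
          PySem.Set.add (PySem.Set.add s j) (PySem.Int.floordiv number j)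
        else s)
    else s

def request_alt (number : Int) : String :=
  let divs : PySem.Set Int := collectDivs number (number.toNat + 1) 1 PySem.Set.empty
  let dividers := PySem.List.sorted (divs.filter (fun d => decide (3 ≤ d))) (fun x => x) false
  let parts := (PySem.List.pyRange 1 (number+1) 1).foldl
    (fun parts count => dividers.foldl
      (fun ps d => if d - count > count then
          ps ++ [" " ++ PySem.Int.toStr count ++ " " ++ PySem.Int.toStr (d - count) ++ " | "]
        else ps) parts) ([] : List String)
  PySem.Str.join "" parts

-- ===== PRECONDITION & SPEC =====
def Spec_request (number : Int) (out : String) : Prop := out = request_alt number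
instance (number : Int) (out : String) : Decidable (Spec_request number out) := by unfold Spec_request; infer_instance

-- ===== CLAIM (what is proved, stated in full; the proofs are below) =====
def Claim_equal_request : Prop := ∀ (number : Int), Dom_request number → Spec_request number (request number)

-- ===== LEMMAS AND PROOFS =====

-- membership in the collect loop's set
lemma mem_collect (n : Int) : ∀ (fuel : Nat) (j : Int) (s : PySem.Set Int), 1 ≤ j →
    n < (j + fuel) * (j + fuel) → ∀ x : Int,
    (x ∈ collectDivs n fuel j s ↔ x ∈ s ∨ ∃ k : Int, j ≤ k ∧ k*k ≤ n ∧
      PySem.Int.mod n k = 0 ∧ (x = k ∨ x = PySem.Int.floordiv n k)) := by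
  intro fuel
  induction fuel with
  | zero =>
    intro j s hj hfuel x
    simp only [collectDivs]
    constructor
    · intro h; exact Or.inl h
    · rintro (h | ⟨k, hk1, hk2, _⟩)
      · exact h
      · exfalso; push_cast at hfuel; nlinarith
  | succ fuel ih =>
    intro j s hj hfuel x
    simp only [collectDivs]
    by_cases hle : j * j ≤ n
    · rw [if_pos hle]
      have hfuel' : n < (j + 1 + fuel) * (j + 1 + fuel) := by push_cast at hfuel ⊢; nlinarith
      by_cases hmod : PySem.Int.mod n j = 0
      · rw [if_pos hmod, ih (j+1) _ (by omega) hfuel' x]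
        simp only [PySem.Set.mem_add]
        constructor
        · rintro ((⟨h | h⟩ | h) | ⟨k, hk1, hk2, hk3, hk4⟩)
          · exact Or.inl h
          · exact Or.inr ⟨j, le_refl j, hle, hmod, Or.inl h⟩
          · exact Or.inr ⟨j, le_refl j, hle, hmod, Or.inr h⟩
          · exact Or.inr ⟨k, by omega, hk2, hk3, hk4⟩
        · rintro (h | ⟨k, hk1, hk2, hk3, hk4⟩)
          · exact Or.inl (Or.inl (Or.inl h))
          · rcases eq_or_lt_of_le hk1 with rfl | hlt
            · rcases hk4 with h | h
              · exact Or.inl (Or.inl (Or.inr h))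
              · exact Or.inl (Or.inr h)
            · exact Or.inr ⟨k, by omega, hk2, hk3, hk4⟩
      · rw [if_neg hmod, ih (j+1) _ (by omega) hfuel' x]
        constructor
        · rintro (h | ⟨k, hk1, hk2, hk3, hk4⟩)
          · exact Or.inl h
          · exact Or.inr ⟨k, by omega, hk2, hk3, hk4⟩
        · rintro (h | ⟨k, hk1, hk2, hk3, hk4⟩)
          · exact Or.inl h
          · rcases eq_or_lt_of_le hk1 with rfl | hlt
            · exact absurd hk3 hmod
            · exact Or.inr ⟨k, by omega, hk2, hk3, hk4⟩
    · rw [if_neg hle]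
      constructor
      · intro h; exact Or.inl h
      · rintro (h | ⟨k, hk1, hk2, _⟩)
        · exact h
        · exfalso; nlinarith

lemma nodup_collect (n : Int) : ∀ (fuel : Nat) (j : Int) (s : PySem.Set Int),
    List.Nodup s → List.Nodup (collectDivs n fuel j s) := by
  intro fuel
  induction fuel with
  | zero => intro j s hs; simpa [collectDivs] using hs
  | succ fuel ih =>
    intro j s hs
    simp only [collectDivs]
    split_ifs with h1 h2
    · exact ih _ _ (PySem.Set.nodup_add _ _ (PySem.Set.nodup_add _ _ hs))
    · exact ih _ _ hs
    · exact hs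

-- the arithmetic heart: a number x ∈ [3, n] divides n iff the √-sweep meets it
lemma divisor_characterisation (n x : Int) (h3 : 3 ≤ x) :
    (∃ k : Int, 1 ≤ k ∧ k*k ≤ n ∧ PySem.Int.mod n k = 0 ∧
      (x = k ∨ x = PySem.Int.floordiv n k)) ↔ (x < n + 1 ∧ PySem.Int.mod n x = 0) := by
  constructor
  · rintro ⟨k, hk1, hk2, hk3, hk4⟩
    rw [PySem.Int.mod_eq_zero_iff_dvd] at hk3
    have hn : 1 ≤ n := by nlinarith
    obtain ⟨c, rfl⟩ := hk3
    have hdiv : PySem.Int.floordiv (k * c) k = c := by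
      rw [PySem.Int.floordiv_eq_ediv_of_pos (by omega)]
      exact Int.mul_ediv_cancel_left c (by omega)
    rcases hk4 with rfl | rfl
    · refine ⟨by nlinarith, ?_⟩
      rw [PySem.Int.mod_eq_zero_iff_dvd]; exact ⟨c, rfl⟩
    · rw [hdiv] at h3 ⊢
      refine ⟨by nlinarith, ?_⟩
      rw [PySem.Int.mod_eq_zero_iff_dvd]; exact ⟨k, mul_comm k c⟩
  · rintro ⟨hlt, hdvd⟩
    rw [PySem.Int.mod_eq_zero_iff_dvd] at hdvd
    obtain ⟨c, rfl⟩ := hdvd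
    have hc1 : 1 ≤ c := by nlinarith
    by_cases hxx : x * x ≤ x * c
    · exact ⟨x, by omega, hxx, by rw [PySem.Int.mod_eq_zero_iff_dvd]; exact ⟨c, rfl⟩,
        Or.inl rfl⟩
    · refine ⟨c, hc1, by nlinarith, ?_, Or.inr ?_⟩
      · rw [PySem.Int.mod_eq_zero_iff_dvd]; exact ⟨x, mul_comm x c⟩
      · rw [PySem.Int.floordiv_eq_ediv_of_pos (by omega), mul_comm,
          Int.mul_ediv_cancel_left x (by omega)]
  -- (nothing)

-- B's sorted filtered set equals A's filtered range
lemma dividers_eq (n : Int) :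
    PySem.List.sorted
      ((collectDivs n (n.toNat + 1) 1 PySem.Set.empty).filter (fun d => decide (3 ≤ d)))
      (fun x => x) false
    = (PySem.List.pyRange 3 (n+1) 1).filter (fun i => decide (PySem.Int.mod n i = 0)) := by
  apply PySem.List.sorted_eq_of_perm_of_pairwise_lt
  · rw [List.perm_ext_iff_of_nodup
      (List.Nodup.filter _ (PySem.List.nodup_pyRange_one 3 (n+1)))
      (List.Nodup.filter _ (nodup_collect n _ 1 PySem.Set.empty List.nodup_nil))]
    intro x
    have hfuel : n < ((1 : Int) + (n.toNat + 1 : Nat)) * ((1 : Int) + (n.toNat + 1 : Nat)) := by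
      have := Int.self_le_toNat n
      have h0 : (0:Int) ≤ (n.toNat : Int) := Int.natCast_nonneg _
      push_cast
      nlinarith
    rw [List.mem_filter, List.mem_filter,
      mem_collect n _ 1 _ (le_refl 1) hfuel x, PySem.List.mem_pyRange_one]
    simp only [PySem.Set.empty, decide_eq_true_eq, List.not_mem_nil, false_or]
    constructor
    · rintro ⟨⟨h3, hlt⟩, hm⟩
      exact ⟨((divisor_characterisation n x h3).2 ⟨hlt, hm⟩), h3⟩
    · rintro ⟨hex, h3⟩
      obtain ⟨hlt, hm⟩ := (divisor_characterisation n x h3).1 hex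
      exact ⟨⟨h3, hlt⟩, hm⟩
  · exact List.Pairwise.filter _ (PySem.List.pairwise_lt_pyRange_one 3 (n+1))

-- String.join plumbing
lemma intercalate_nil (l : List (List Char)) : ([] : List Char).intercalate l = l.flatten := by
  simp only [List.intercalate]
  induction l with
  | nil => simp
  | cons a t ih => cases t <;> simp_all [List.intersperse]

lemma join_snoc (ps : List String) (x : String) :
    PySem.Str.join "" (ps ++ [x]) = PySem.Str.join "" ps ++ x := by
  apply String.toList_injective
  simp [PySem.Str.toList_join, PySem.Chars.join, intercalate_nil]

lemma join_nil_str : PySem.Str.join "" ([] : List String) = "" := by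
  apply String.toList_injective
  simp [PySem.Str.toList_join, PySem.Chars.join, intercalate_nil]

-- one count-step: B's inner fragment-appending fold joins to A's brute_forcer output
lemma inner_eq (n c : Int) (hc : 1 ≤ c) (D : List Int) : ∀ (tmp : String) (ps : List String),
    PySem.Str.join "" ps = tmp →
    PySem.Str.join "" (D.foldl (fun ps d => if d - c > c then
        ps ++ [" " ++ PySem.Int.toStr c ++ " " ++ PySem.Int.toStr (d - c) ++ " | "]
      else ps) ps)
    = D.foldl (fun tmp i => if i - c > 0 ∧ i - c > c then
        tmp ++ " " ++ PySem.Int.toStr c ++ " " ++ PySem.Int.toStr (i - c) ++ " | "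
      else tmp) tmp := by
  induction D with
  | nil => intro tmp ps h; simpa using h
  | cons d D ih =>
    intro tmp ps h
    simp only [List.foldl_cons]
    by_cases hd : d - c > c
    · rw [if_pos hd, if_pos ⟨by omega, hd⟩]
      apply ih
      rw [join_snoc, h]
      simp [String.append_assoc]
    · rw [if_neg hd, if_neg (by omega)]
      exact ih tmp ps h

-- A's fold starting from an arbitrary string factors through brute_forcer from ""
lemma bf_factor (n c : Int) (D : List Int) : ∀ (t : String),
    D.foldl (fun tmp i => if i - c > 0 ∧ i - c > c then
        tmp ++ " " ++ PySem.Int.toStr c ++ " " ++ PySem.Int.toStr (i - c) ++ " | "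
      else tmp) t = t ++ brute_forcer n D c := by
  unfold brute_forcer
  induction D with
  | nil => intro t; simp
  | cons d D ih =>
    intro t
    simp only [List.foldl_cons]
    by_cases hd : d - c > 0 ∧ d - c > c
    · rw [if_pos hd, if_pos hd,
        ih (t ++ " " ++ PySem.Int.toStr c ++ " " ++ PySem.Int.toStr (d - c) ++ " | "),
        ih (("" : String) ++ " " ++ PySem.Int.toStr c ++ " " ++ PySem.Int.toStr (d - c) ++ " | ")]
      simp [String.append_assoc]
    · rw [if_neg hd, if_neg hd, ih]

-- the count loop: A's accumulating fold equals the join of B's parts list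
lemma emit_eq (n : Int) (D : List Int) (b : Int) : ∀ (a : Int) (s : String) (ps : List String),
    1 ≤ a → PySem.Str.join "" ps = s →
    ((PySem.List.pyRange a b 1).foldl
      (fun (p : String × Int) _i => (p.1 ++ brute_forcer n D p.2, p.2 + 1)) (s, a)).1
    = PySem.Str.join "" ((PySem.List.pyRange a b 1).foldl
      (fun parts count => D.foldl (fun ps d => if d - count > count then
          ps ++ [" " ++ PySem.Int.toStr count ++ " " ++ PySem.Int.toStr (d - count) ++ " | "]
        else ps) parts) ps) := by
  have hwf : ∀ (m : Nat) (a : Int), (b - a).toNat = m → ∀ (s : String) (ps : List String),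
      1 ≤ a → PySem.Str.join "" ps = s →
      ((PySem.List.pyRange a b 1).foldl
        (fun (p : String × Int) _i => (p.1 ++ brute_forcer n D p.2, p.2 + 1)) (s, a)).1
      = PySem.Str.join "" ((PySem.List.pyRange a b 1).foldl
        (fun parts count => D.foldl (fun ps d => if d - count > count then
            ps ++ [" " ++ PySem.Int.toStr count ++ " " ++ PySem.Int.toStr (d - count) ++ " | "]
          else ps) parts) ps) := by
    intro m
    induction m with
    | zero =>
      intro a hm s ps ha hjoin
      rw [PySem.List.pyRange_one_eq_nil (by omega)]
      simpa using hjoin.symm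
    | succ m ih =>
      intro a hm s ps ha hjoin
      rcases le_or_gt b a with hba | hab
      · rw [PySem.List.pyRange_one_eq_nil hba]; simpa using hjoin.symm
      · rw [PySem.List.pyRange_one_cons hab]
        simp only [List.foldl_cons]
        exact ih (a+1) (by omega) _ _ (by omega)
          (by rw [inner_eq n a ha D s ps hjoin, bf_factor n a D s])
  intro a s ps ha hjoin
  exact hwf (b - a).toNat a rfl s ps ha hjoin

-- ===== VERDICT (by name: the statement is the Claim_ definition above) =====
theorem request_spec : Claim_equal_request := by
  intro number _
  unfold Spec_request
  simp only [request, request_alt, PySem.List.foldl_append_ite_eq_filter, dividers_eq,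
    List.nil_append]
  exact emit_eq number _ (number+1) 1 "" [] (le_refl 1) join_nil_str
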